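-- pv_equiv track=rewrite | github.com/MrBrantCode/unitest_baseline | mut_generate/mist_train_taco/taco_17099/solution.py | find_smallest_M
-- ===== SOURCE A (Python) =====
-- def find_smallest_M(N: int) -> int:
--     # Precompute the list of values 2^x - 1 for x in range(1, 31)
--     special_values = [2 ** x - 1 for x in range(1, 31)]
--
--     # Handle specific cases
--     if N == 1:
--         return 2
--     elif N in special_values:
--         return N // 2
--     else:
--         return -1
-- ===== SOURCE B (Python) =====
-- def _is_pow2_minus_1(n: int, k: int) -> bool:
--     # n == 2**x - 1 for some 1 <= x <= k, checked by repeated halving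
--     if k == 0:
--         return False
--     if n == 1:
--         return True
--     return n % 2 == 1 and n > 1 and _is_pow2_minus_1(n // 2, k - 1)
--
--
-- def find_smallest_M(N: int) -> int:
--     if N == 1:
--         return 2
--     return N // 2 if _is_pow2_minus_1(N, 30) else -1
-- ===== Notes on version B (the rewrite author's own statement) =====
-- stated objective: alternative
-- what changed: Instead of materialising the 30-element table [2^x-1 for x in 1..30] and scanning it with 'in', B tests the 2^x-1 property directly by repeated halving (n odd, n>1, recurse on n//2) with a depth cap of 30 that enforces the table's upper bound.
import Mathlib
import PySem

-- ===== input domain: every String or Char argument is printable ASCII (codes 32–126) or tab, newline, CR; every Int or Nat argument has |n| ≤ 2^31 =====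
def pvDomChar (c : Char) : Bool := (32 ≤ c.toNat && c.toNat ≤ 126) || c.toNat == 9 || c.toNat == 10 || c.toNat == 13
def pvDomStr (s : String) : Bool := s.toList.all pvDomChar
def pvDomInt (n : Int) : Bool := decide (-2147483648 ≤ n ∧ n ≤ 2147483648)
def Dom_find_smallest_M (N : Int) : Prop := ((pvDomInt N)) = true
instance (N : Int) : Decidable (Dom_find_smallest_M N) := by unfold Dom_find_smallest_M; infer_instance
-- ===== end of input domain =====

-- B replaces A's 30-element table scan by a direct recursive test of the 2^x-1 property; same cost, no list.

-- ===== PORT A =====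
-- '2 ** x' is ported as '2 ^ x.toNat': every x drawn from range(1, 31) is positive, so this is exact.
def find_smallest_M (N : Int) : Int :=
  let special_values := (PySem.List.pyRange 1 31 1).map (fun x => (2 : Int) ^ x.toNat - 1)
  if N = 1 then 2
  else if N ∈ special_values then PySem.Int.floordiv N 2
  else -1

-- ===== PORT B =====
-- helper _is_pow2_minus_1(n, k): structural recursion on the depth cap k
def isPow2Minus1 (n : Int) (k : Nat) : Bool :=
  match k with
  | 0 => false
  | k + 1 =>
    if n = 1 then true
    else (PySem.Int.mod n 2 == 1) && decide (1 < n) && isPow2Minus1 (PySem.Int.floordiv n 2) k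

def find_smallest_M_alt (N : Int) : Int :=
  if N = 1 then 2
  else if isPow2Minus1 N 30 then PySem.Int.floordiv N 2
  else -1

-- ===== PRECONDITION & SPEC =====
def Spec_find_smallest_M (N : Int) (out : Int) : Prop := out = find_smallest_M_alt N
instance (N : Int) (out : Int) : Decidable (Spec_find_smallest_M N out) := by unfold Spec_find_smallest_M; infer_instance

-- ===== CLAIM (what is proved, stated in full; the proofs are below) =====
def Claim_equal_find_smallest_M : Prop := ∀ (N : Int), Dom_find_smallest_M N → Spec_find_smallest_M N (find_smallest_M N)

-- ===== LEMMAS AND PROOFS =====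

-- B's recursive test recognises exactly the numbers 2^x - 1 with 1 ≤ x ≤ k.
theorem isPow2Minus1_iff (k : Nat) (n : Int) :
    isPow2Minus1 n k = true ↔ ∃ x : Nat, 1 ≤ x ∧ x ≤ k ∧ n = 2 ^ x - 1 := by
  induction k generalizing n with
  | zero =>
    simp [isPow2Minus1]
  | succ k ih =>
    by_cases hn : n = 1
    · subst hn
      simp [isPow2Minus1]
      exact ⟨1, by norm_num⟩
    · rw [isPow2Minus1]
      simp only [if_neg hn, Bool.and_eq_true, beq_iff_eq, decide_eq_true_eq, ih,
        PySem.Int.mod_eq_emod_of_pos (a := n) (by norm_num : (0:Int) < 2),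
        PySem.Int.floordiv_eq_ediv_of_pos (a := n) (by norm_num : (0:Int) < 2)]
      constructor
      · rintro ⟨⟨hmod, hgt⟩, x, hx1, hxk, hdiv⟩
        refine ⟨x + 1, by omega, by omega, ?_⟩
        have hp : (2:Int) ^ (x + 1) = 2 ^ x * 2 := pow_succ 2 x
        omega
      · rintro ⟨x, hx1, hxk, heq⟩
        -- n ≠ 1 forces x ≥ 2
        have hx2 : 2 ≤ x := by
          rcases Nat.lt_or_ge x 2 with h | h
          · interval_cases x
            · simp at heq; omega
          · exact h
        obtain ⟨y, rfl⟩ : ∃ y, x = y + 1 := ⟨x - 1, by omega⟩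
        have hp : (2:Int) ^ (y + 1) = 2 ^ y * 2 := pow_succ 2 y
        have hge : (2:Int) ^ y ≥ 2 := by
          calc (2:Int) ^ y ≥ 2 ^ 1 := by
                apply pow_le_pow_right₀ <;> omega
            _ = 2 := by norm_num
        exact ⟨⟨by omega, by omega⟩, y, by omega, by omega, by omega⟩

-- A's table membership is the same predicate with k = 30.
theorem mem_special_iff (N : Int) :
    (N ∈ (PySem.List.pyRange 1 31 1).map (fun x => (2 : Int) ^ x.toNat - 1)) ↔
      ∃ x : Nat, 1 ≤ x ∧ x ≤ 30 ∧ N = 2 ^ x - 1 := by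
  simp only [List.mem_map, PySem.List.mem_pyRange_one]
  constructor
  · rintro ⟨a, ⟨ha1, ha31⟩, rfl⟩
    exact ⟨a.toNat, by omega, by omega, rfl⟩
  · rintro ⟨x, hx1, hx30, rfl⟩
    exact ⟨(x : Int), ⟨by omega, by omega⟩, by simp⟩

theorem find_smallest_M_eq_alt (N : Int) : find_smallest_M N = find_smallest_M_alt N := by
  unfold find_smallest_M find_smallest_M_alt
  by_cases hN : N = 1
  · simp [hN]
  · simp only [if_neg hN]
    have h : (N ∈ (PySem.List.pyRange 1 31 1).map (fun x => (2 : Int) ^ x.toNat - 1)) ↔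
        isPow2Minus1 N 30 = true := by
      rw [mem_special_iff, isPow2Minus1_iff]
    by_cases hmem : isPow2Minus1 N 30 = true
    · simp [hmem, h.mpr hmem]
    · simp only [Bool.not_eq_true] at hmem
      simp [h, hmem]

-- ===== VERDICT (by name: the statement is the Claim_ definition above) =====
theorem find_smallest_M_spec : Claim_equal_find_smallest_M := by
  intro N _
  exact find_smallest_M_eq_alt N
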